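-- pv_equiv track=rewrite | github.com/letmeloveyou82/Algorithm | Python/Programmers/수학/부족한 금액 계산하기.py | solution
-- ===== SOURCE A (Python) =====
-- def solution(price, money, count):
--     answer = 0
--     for i in range(1, count+1):
--         answer += (price * i)
--     if answer < money:
--         return 0
--     else:
--         return answer - money
-- ===== SOURCE B (Python) =====
-- def solution(price, money, count):
--     total = price * count * (count + 1) // 2 if count > 0 else 0
--     return max(total - money, 0)
-- ===== Notes on version B (the rewrite author's own statement) =====
-- stated objective: faster
-- what changed: Replaces the O(count) accumulation loop by the closed-form arithmetic-series formula price*count*(count+1)//2 and a max for the shortfall.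
import Mathlib
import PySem

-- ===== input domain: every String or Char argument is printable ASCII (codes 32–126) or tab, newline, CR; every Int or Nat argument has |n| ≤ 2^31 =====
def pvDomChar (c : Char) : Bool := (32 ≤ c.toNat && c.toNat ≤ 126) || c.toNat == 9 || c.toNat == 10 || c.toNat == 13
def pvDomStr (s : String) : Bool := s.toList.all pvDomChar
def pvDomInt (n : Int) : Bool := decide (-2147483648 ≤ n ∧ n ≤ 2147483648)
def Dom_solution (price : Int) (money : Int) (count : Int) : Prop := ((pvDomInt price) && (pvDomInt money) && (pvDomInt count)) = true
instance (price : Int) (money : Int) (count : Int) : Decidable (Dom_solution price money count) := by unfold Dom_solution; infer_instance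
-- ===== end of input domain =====

-- B replaces A's O(count) accumulation loop with the closed-form arithmetic series (faster in a timing run).

-- ===== PORT A =====
def solution (price : Int) (money : Int) (count : Int) : Int :=
  let answer := (PySem.List.pyRange 1 (count + 1) 1).foldl (fun answer i => answer + price * i) 0
  if answer < money then 0 else answer - money

-- ===== PORT B =====
def solution_alt (price : Int) (money : Int) (count : Int) : Int :=
  let total := if count > 0 then PySem.Int.floordiv (price * count * (count + 1)) 2 else 0
  max (total - money) 0

-- ===== PRECONDITION & SPEC =====
def Spec_solution (price : Int) (money : Int) (count : Int) (out : Int) : Prop := out = solution_alt price money count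
instance (price : Int) (money : Int) (count : Int) (out : Int) : Decidable (Spec_solution price money count out) := by unfold Spec_solution; infer_instance

-- ===== CLAIM (what is proved, stated in full; the proofs are below) =====
def Claim_equal_solution : Prop := ∀ (price : Int) (money : Int) (count : Int), Dom_solution price money count → Spec_solution price money count (solution price money count)

-- ===== LEMMAS AND PROOFS =====

theorem pv_loop_eq (price : Int) : ∀ (n : Nat) (s : Int),
    List.foldl (fun a i => a + price * i) s ((List.range n).map (fun k : Nat => (1 : Int) + k))
      = s + price * ((n * (n + 1) / 2 : Nat) : Int) := by
  intro n
  induction n with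
  | zero => intro s; simp
  | succ n ih =>
    intro s
    rw [List.range_succ, List.map_append, List.foldl_append, ih]
    have h : (n + 1) * (n + 1 + 1) / 2 = n * (n + 1) / 2 + (n + 1) := by
      have e : (n + 1) * (n + 1 + 1) = n * (n + 1) + 2 * (n + 1) := by ring
      obtain ⟨k, hk⟩ := Nat.even_mul_succ_self n
      omega
    simp only [List.map_cons, List.map_nil, List.foldl_cons, List.foldl_nil, h]
    push_cast
    ring

theorem pv_main (price money count : Int) :
    solution price money count = solution_alt price money count := by
  unfold solution solution_alt
  rw [PySem.List.pyRange_one]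
  have hcast : ((count + 1 - 1 : Int)).toNat = count.toNat := by omega
  rw [hcast, pv_loop_eq]
  by_cases hc : count > 0
  · have hn : ((count.toNat : Int)) = count := Int.toNat_of_nonneg (by omega)
    have htri : ((count.toNat * (count.toNat + 1) / 2 : Nat) : Int) * 2 = count * (count + 1) := by
      have h2 : (count.toNat * (count.toNat + 1) / 2) * 2 = count.toNat * (count.toNat + 1) := by
        obtain ⟨k, hk⟩ := Nat.even_mul_succ_self count.toNat
        omega
      calc ((count.toNat * (count.toNat + 1) / 2 : Nat) : Int) * 2
          = ((count.toNat * (count.toNat + 1) / 2 * 2 : Nat) : Int) := by push_cast; ring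
        _ = ((count.toNat * (count.toNat + 1) : Nat) : Int) := by rw [h2]
        _ = count * (count + 1) := by push_cast [hn]; ring
    have hfd : PySem.Int.floordiv (price * count * (count + 1)) 2
        = price * ((count.toNat * (count.toNat + 1) / 2 : Nat) : Int) := by
      rw [PySem.Int.floordiv_eq_ediv_of_pos (by norm_num)]
      have : price * count * (count + 1) = 2 * (price * ((count.toNat * (count.toNat + 1) / 2 : Nat) : Int)) := by
        rw [show (2 : Int) * (price * ((count.toNat * (count.toNat + 1) / 2 : Nat) : Int))
            = price * (((count.toNat * (count.toNat + 1) / 2 : Nat) : Int) * 2) by ring, htri]; ring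
      rw [this, Int.mul_ediv_cancel_left _ (by norm_num)]
    simp only [hc, if_pos, hfd]
    split_ifs with h
    · omega
    · omega
  · have hn0 : count.toNat = 0 := by omega
    rw [if_neg hc]
    simp only [hn0, Nat.zero_mul, Nat.zero_div, Nat.cast_zero, mul_zero, add_zero]
    split_ifs with h <;> omega

-- ===== VERDICT (by name: the statement is the Claim_ definition above) =====
theorem solution_spec : Claim_equal_solution := by
  intro price money count _
  exact pv_main price money count
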